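-- pv_equiv track=rewrite | github.com/rhosocial/python-activerecord | src/rhosocial/activerecord/query/base.py | _replace_question_marks
-- ===== SOURCE A (Python) =====
-- def _replace_question_marks(sql: str, placeholder: str) -> str:
--     """Replace question mark placeholders with database-specific placeholders.
--
--     This method carefully replaces question marks that are used as parameter
--     placeholders, while preserving question marks that might appear in string literals.
--
--     Args:
--         sql: Original SQL with question mark placeholders
--         placeholder: Database-specific placeholder to use
--
--     Returns:
--         SQL with replaced placeholders
--     """
--     # Simple implementation: directly replace all question marks
--     # Note: This implementation assumes all question marks in SQL are placeholders, not part of string literals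
--     # For complex cases, more sophisticated parsing might be needed
--
--     # Check if we need indexed placeholders (e.g., $1, $2, $3 for PostgreSQL)
--     if placeholder.find('%d') != -1:
--         # For indexed placeholders
--         parts = []
--         param_index = 1
--         i = 0
--         while i < len(sql):
--             if sql[i] == '?':
--                 # Replace with indexed placeholder
--                 parts.append(placeholder % param_index)
--                 param_index += 1
--             else:
--                 parts.append(sql[i])
--             i += 1
--         return ''.join(parts)
--     else:
--         # For non-indexed placeholders
--         return sql.replace('?', placeholder)
-- ===== SOURCE B (Python) =====
-- def _replace_question_marks(sql: str, placeholder: str) -> str: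
--     """Split on '?' and stitch with indexed placeholders; plain replace otherwise."""
--     if placeholder.find('%d') != -1:
--         parts = sql.split('?')
--         out = []
--         for i in range(len(parts) - 1):
--             out.append(parts[i])
--             out.append(placeholder % (i + 1))
--         out.append(parts[-1])
--         return ''.join(out)
--     else:
--         return sql.replace('?', placeholder)
-- ===== Notes on version B (the rewrite author's own statement) =====
-- stated objective: idiomatic
-- what changed: The indexed branch now computes parts = sql.split('?') once and joins the segments with incrementing formatted placeholders, instead of A's character-by-character while-loop that appends every single character to a list; the non-indexed branch stays sql.replace.
-- outside the precondition, e.g. on _replace_question_marks('?', '%%%d'): A returns '%1', B returns '%1'; on _replace_question_marks('a', '%d%d'): A returns 'a', B returns 'a'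
import Mathlib
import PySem

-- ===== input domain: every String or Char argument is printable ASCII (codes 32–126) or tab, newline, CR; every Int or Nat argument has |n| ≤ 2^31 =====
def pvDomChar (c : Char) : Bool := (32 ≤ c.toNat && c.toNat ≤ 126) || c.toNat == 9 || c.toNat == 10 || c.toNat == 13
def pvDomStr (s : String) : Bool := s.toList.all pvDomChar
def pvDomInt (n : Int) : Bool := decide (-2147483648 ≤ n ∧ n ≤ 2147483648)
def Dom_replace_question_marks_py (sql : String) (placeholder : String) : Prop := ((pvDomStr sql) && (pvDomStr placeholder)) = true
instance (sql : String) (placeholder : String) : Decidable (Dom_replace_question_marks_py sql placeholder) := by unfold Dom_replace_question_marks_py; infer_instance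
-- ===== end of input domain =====

-- B rebuilds the indexed branch by splitting on '?' and stitching the segments with
-- incrementing indexed placeholders (idiomatic decomposition, no speed claim).

-- shared helper: `placeholder % i` for a placeholder whose only '%' is the single
-- '%d' conversion (guaranteed by Pre_): substitute str(i) for '%d'
def pvFmt (ph : List Char) (i : Int) : List Char :=
  PySem.Chars.replace ph ['%', 'd'] (PySem.Int.toChars i)

-- ===== PORT A =====
-- A's while-loop over the characters of sql, accumulating one-element pieces /
-- formatted placeholders in `parts` (kept reversed, reversed back at the end)
def pvALoop (ph : List Char) : List Char → Int → List (List Char) → List (List Char)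
  | [], _, parts => parts.reverse
  | c :: rest, idx, parts =>
    if c = '?' then pvALoop ph rest (idx + 1) (pvFmt ph idx :: parts)
    else pvALoop ph rest idx ([c] :: parts)

def replace_question_marks_py (sql : String) (placeholder : String) : String :=
  if PySem.Str.find placeholder "%d" ≠ -1 then
    String.ofList (PySem.Chars.join [] (pvALoop placeholder.toList sql.toList 1 []))
  else
    PySem.Str.replace sql "?" placeholder

-- ===== PORT B =====
-- B's loop over parts = sql.split('?'): each part but the last is followed by
-- placeholder % (i+1); the final part closes the string
def pvBBuild (ph : List Char) : List (List Char) → Int → List Char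
  | [], _ => []
  | [last], _ => last
  | p :: q :: rest, i => p ++ pvFmt ph i ++ pvBBuild ph (q :: rest) (i + 1)

def replace_question_marks_py_alt (sql : String) (placeholder : String) : String :=
  if PySem.Str.find placeholder "%d" ≠ -1 then
    String.ofList (pvBBuild placeholder.toList (PySem.Chars.splitOn sql.toList ['?']) 1)
  else
    PySem.Str.replace sql "?" placeholder

-- ===== PRECONDITION & SPEC =====
-- Pre_ excludes placeholders that contain '%d' plus further '%' characters: there
-- Python's %-formatting goes beyond the single '%d' substitution the ports model —
-- it raises TypeError/ValueError on extra conversion specifiers, or applies the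
-- '%%' escape (and when sql has no '?' the formatting never runs and A returns
-- sql unchanged); with a single '%', `placeholder % i` is exactly that substitution.
def Pre_replace_question_marks_py (sql : String) (placeholder : String) : Prop :=
  PySem.Str.find placeholder "%d" ≠ -1 → PySem.Str.count placeholder "%" = 1
instance (sql : String) (placeholder : String) : Decidable (Pre_replace_question_marks_py sql placeholder) := by
  unfold Pre_replace_question_marks_py; infer_instance

def pvWitness_replace_question_marks_py : String × String := ("SELECT * FROM t WHERE a = ? AND b = ?", "$%d")

def Spec_replace_question_marks_py (sql : String) (placeholder : String) (out : String) : Prop :=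
  out = replace_question_marks_py_alt sql placeholder
instance (sql : String) (placeholder : String) (out : String) : Decidable (Spec_replace_question_marks_py sql placeholder out) := by
  unfold Spec_replace_question_marks_py; infer_instance

-- ===== CLAIM (what is proved, stated in full; the proofs are below) =====
def Claim_equal_replace_question_marks_py : Prop := ∀ (sql : String) (placeholder : String), Dom_replace_question_marks_py sql placeholder → Pre_replace_question_marks_py sql placeholder → Spec_replace_question_marks_py sql placeholder (replace_question_marks_py sql placeholder)

-- ===== LEMMAS AND PROOFS =====

-- reference splitter: sql.split('?') as a simple structural recursion
def pvSplit1 : List Char → List (List Char)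
  | [] => [[]]
  | c :: t => if c = '?' then [] :: pvSplit1 t else (pvSplit1 t).modifyHead (c :: ·)

-- reference result of the indexed branch, built character by character
def pvSimple (ph : List Char) : List Char → Int → List Char
  | [], _ => []
  | c :: t, i => if c = '?' then pvFmt ph i ++ pvSimple ph t (i + 1) else c :: pvSimple ph t i

theorem pvSplit1_ne_nil (l : List Char) : pvSplit1 l ≠ [] := by
  cases l with
  | nil => simp [pvSplit1]
  | cons c t =>
    simp only [pvSplit1]
    split_ifs
    · simp
    · cases h : pvSplit1 t with
      | nil => exact absurd h (pvSplit1_ne_nil t)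
      | cons p ps => simp

theorem pvSplitOn_go_eq (l : List Char) : ∀ (fuel : Nat) (cur : List Char) (_h : l.length ≤ fuel) (pacc : List (List Char)),
    PySem.Chars.splitOn.go ['?'] fuel l cur pacc = pacc.reverse ++ (pvSplit1 l).modifyHead (cur.reverse ++ ·) := by
  induction l with
  | nil =>
    intro fuel cur _ pacc
    cases fuel <;> simp [PySem.Chars.splitOn.go, pvSplit1]
  | cons c t ih =>
    intro fuel cur h pacc
    cases fuel with
    | zero => simp at h
    | succ f =>
      simp only [PySem.Chars.splitOn.go]
      by_cases hc : c = '?'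
      · subst hc
        rw [if_pos (by simp)]
        simp only [List.length, List.drop_succ_cons, List.drop_zero]
        rw [ih f [] (by simpa using h) _]
        simp [pvSplit1]
        cases hps : pvSplit1 t with
        | nil => exact absurd hps (pvSplit1_ne_nil t)
        | cons p ps => simp
      · rw [if_neg (by simp [List.isPrefixOf_iff_prefix, List.cons_prefix_cons, Ne.symm hc])]
        rw [ih f (c :: cur) (by simpa using Nat.le_of_succ_le_succ h) pacc]
        simp only [pvSplit1, if_neg hc]
        cases hps : pvSplit1 t with
        | nil => exact absurd hps (pvSplit1_ne_nil t)
        | cons p ps => simp [List.modifyHead]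

theorem pvSplitOn_eq (s : List Char) : PySem.Chars.splitOn s ['?'] = pvSplit1 s := by
  rw [PySem.Chars.splitOn, pvSplitOn_go_eq s (s.length + 1) [] (by omega) []]
  cases hps : pvSplit1 s with
  | nil => exact absurd hps (pvSplit1_ne_nil s)
  | cons p ps => simp

theorem pvJoin_nil (ps : List (List Char)) : PySem.Chars.join [] ps = ps.flatten := by
  rw [PySem.Chars.join]
  induction ps with
  | nil => simp [List.intercalate]
  | cons p t ih =>
    cases t with
    | nil => simp [List.intercalate]
    | cons q r =>
      simp only [List.intercalate, List.intersperse] at *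
      simp_all

theorem pvALoop_flatten (ph : List Char) (l : List Char) : ∀ (i : Int) (parts : List (List Char)),
    (pvALoop ph l i parts).flatten = parts.reverse.flatten ++ pvSimple ph l i := by
  induction l with
  | nil => intro i parts; simp [pvALoop, pvSimple]
  | cons c t ih =>
    intro i parts
    by_cases hc : c = '?'
    · subst hc
      simp only [pvALoop, pvSimple, if_true]
      rw [ih]
      simp
    · simp only [pvALoop, pvSimple, if_neg hc]
      rw [ih]
      simp

theorem pvBBuild_cons (ph : List Char) (c : Char) (p : List Char) (ps : List (List Char)) (i : Int) :
    pvBBuild ph ((c :: p) :: ps) i = c :: pvBBuild ph (p :: ps) i := by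
  cases ps <;> simp [pvBBuild]

theorem pvBBuild_split (ph : List Char) (l : List Char) : ∀ (i : Int),
    pvBBuild ph (pvSplit1 l) i = pvSimple ph l i := by
  induction l with
  | nil => intro i; simp [pvSplit1, pvBBuild, pvSimple]
  | cons c t ih =>
    intro i
    by_cases hc : c = '?'
    · subst hc
      simp only [pvSplit1, pvSimple, if_true]
      cases hps : pvSplit1 t with
      | nil => exact absurd hps (pvSplit1_ne_nil t)
      | cons p ps =>
        simp only [pvBBuild, List.nil_append]
        rw [← hps, ih]
    · simp only [pvSplit1, if_neg hc, pvSimple]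
      cases hps : pvSplit1 t with
      | nil => exact absurd hps (pvSplit1_ne_nil t)
      | cons p ps =>
        simp only [List.modifyHead, pvBBuild_cons]
        rw [← hps, ih]

-- ===== VERDICT (by name: the statement is the Claim_ definition above) =====
theorem replace_question_marks_py_spec : Claim_equal_replace_question_marks_py := by
  intro sql placeholder _hdom _hpre
  unfold Spec_replace_question_marks_py replace_question_marks_py replace_question_marks_py_alt
  split_ifs
  · rw [pvJoin_nil, pvALoop_flatten, pvSplitOn_eq, pvBBuild_split]
    simp
  · rfl
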